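-- pv_equiv track=rewrite | github.com/winterash2/algorithm_study_2021_1 | 210222-210224/프)42578 - 위장/이동재.py | solution
-- ===== SOURCE A (Python) =====
-- def solution(clothes):
--     answer = 1
--     kindOfClothes = dict()
--     for cloth in clothes:
--         _ , kind = cloth
--         if kind in kindOfClothes: # 여기서 try except 문 쓰면 시간 더 오래 걸림
--             kindOfClothes[kind] += 1
--         else:
--             kindOfClothes[kind] = 1
--
--     values = kindOfClothes.values()
--
--     for v in values: # 있거나 없거나 조합
--         answer *= (v+1) # 1 더하는 이유는 안 입는 경우도 포함하기 위해
--     answer -= 1 # 마지막에 하나 빼는 이유는 하나라도 입어야 하니까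
--
--     return answer
-- ===== SOURCE B (Python) =====
-- def solution(clothes):
--     kinds = [kind for _, kind in clothes]
--
--     def prod_rest(ks):
--         if not ks:
--             return 1
--         k = ks[0]
--         rest = [x for x in ks if x != k]
--         return (len(ks) - len(rest) + 1) * prod_rest(rest)
--
--     return prod_rest(kinds) - 1
-- ===== Notes on version B (the rewrite author's own statement) =====
-- stated objective: alternative
-- what changed: Replaces A's hash-table counting pass plus a values loop by a recursive partition: repeatedly take the first remaining kind, count it by the length drop after filtering it out, multiply (count+1) and recurse on the remainder; no dictionary is built.
import Mathlib
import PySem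

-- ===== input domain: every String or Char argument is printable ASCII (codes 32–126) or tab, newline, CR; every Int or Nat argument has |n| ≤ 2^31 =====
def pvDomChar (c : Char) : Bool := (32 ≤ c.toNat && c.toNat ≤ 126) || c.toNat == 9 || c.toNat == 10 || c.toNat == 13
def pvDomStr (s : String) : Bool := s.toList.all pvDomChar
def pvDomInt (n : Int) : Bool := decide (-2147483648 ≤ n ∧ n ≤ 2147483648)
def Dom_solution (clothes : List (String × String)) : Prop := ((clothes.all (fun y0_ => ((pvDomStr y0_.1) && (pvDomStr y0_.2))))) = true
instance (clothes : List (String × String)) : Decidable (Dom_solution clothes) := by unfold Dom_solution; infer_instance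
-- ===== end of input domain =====

-- B replaces A's dict-counting pass by a recursive partition on the kinds list; alternative decomposition, return value proved equal.

-- ===== PORT A =====
-- the 'if kind in dict' branch reads the existing count; getD kind 0 is exact there since the key is present
def solution (clothes : List (String × String)) : Int :=
  let kindOfClothes : PySem.Dict String Int :=
    clothes.foldl (fun d cloth =>
      let kind := cloth.2
      if d.contains kind then d.insert kind (d.getD kind 0 + 1)
      else d.insert kind 1) PySem.Dict.empty
  let answer := kindOfClothes.values.foldl (fun a v => a * (v + 1)) 1
  answer - 1

-- ===== PORT B =====
def prodRest (ks : List String) : Int :=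
  match ks with
  | [] => 1
  | k :: t =>
    let rest := (k :: t).filter (fun x => decide (x ≠ k))
    ((((k :: t).length : Int) - (rest.length : Int)) + 1) * prodRest rest
termination_by ks.length
decreasing_by
  simp only [List.filter]
  have : (List.filter (fun x => decide (x ≠ k)) t).length ≤ t.length := List.length_filter_le _ _
  simp_all

def solution_alt (clothes : List (String × String)) : Int :=
  prodRest (clothes.map (fun c => c.2)) - 1

-- ===== PRECONDITION & SPEC =====
def Spec_solution (clothes : List (String × String)) (out : Int) : Prop := out = solution_alt clothes
instance (clothes : List (String × String)) (out : Int) : Decidable (Spec_solution clothes out) := by unfold Spec_solution; infer_instance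

-- ===== CLAIM (what is proved, stated in full; the proofs are below) =====
def Claim_equal_solution : Prop := ∀ (clothes : List (String × String)), Dom_solution clothes → Spec_solution clothes (solution clothes)

-- ===== LEMMAS AND PROOFS =====

-- A's counting loop is the Counter fold
theorem solution_fold_eq_counter (clothes : List (String × String)) :
    clothes.foldl (fun d cloth =>
      let kind := cloth.2
      if d.contains kind then d.insert kind (d.getD kind 0 + 1)
      else d.insert kind 1) (PySem.Dict.empty : PySem.Dict String Int)
    = PySem.Dict.counter (clothes.map (fun c => c.2)) := by
  rw [← PySem.Dict.foldl_insert_getD_add_one_eq_counter, List.foldl_map]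
  congr 1
  funext d c
  by_cases h : d.contains c.2
  · simp [h]
  · rw [PySem.Dict.getD_of_not_contains d 0 (by simpa using h)]
    simp [h]

theorem foldl_mul_succ (l : List Int) (a : Int) :
    l.foldl (fun a v => a * (v + 1)) a = a * (l.map (fun v => v + 1)).prod := by
  induction l generalizing a with
  | nil => simp
  | cons x xs ih => simp [ih, mul_assoc]

-- set(filter) = filter(set)
theorem ofList_filter (p : String → Bool) (l : List String) :
    PySem.Set.ofList (l.filter p) = (PySem.Set.ofList l).filter p := by
  induction l with
  | nil => rfl
  | cons x xs ih =>
    by_cases h : p x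
    · simp [h, PySem.Set.ofList_cons, ih, PySem.Set.discard, List.filter_filter]
      congr 1
      funext a
      rw [Bool.and_comm]
    · simp [h, PySem.Set.ofList_cons, ih, PySem.Set.discard, List.filter_filter]
      apply List.filter_congr
      intro a _
      by_cases hx : a = x
      · subst hx; simp [h]
      · simp [hx]

theorem count_filter_ne (k j : String) (l : List String) (h : j ≠ k) :
    (l.filter (fun x => decide (x ≠ k))).count j = l.count j := by
  rw [List.count_filter]
  simp [h]

-- B's recursion computes the product of (count+1) over the distinct kinds
theorem prodRest_nil : prodRest [] = 1 := by unfold prodRest; rfl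

theorem prodRest_cons (k : String) (t : List String) :
    prodRest (k :: t) =
      ((((k :: t).length : Int) - (((k :: t).filter (fun x => decide (x ≠ k))).length : Int)) + 1)
        * prodRest ((k :: t).filter (fun x => decide (x ≠ k))) := by
  conv_lhs => unfold prodRest

theorem prodRest_eq (ks : List String) :
    prodRest ks = ((PySem.Set.ofList ks).map (fun k => ((ks.count k : Int) + 1))).prod := by
  induction hn : ks.length using Nat.strong_induction_on generalizing ks with
  | _ n ih =>
  match ks with
  | [] => simp [prodRest_nil]
  | k :: t =>
    rw [prodRest_cons]
    have hrest : (k :: t).filter (fun x => decide (x ≠ k)) = t.filter (fun x => decide (x ≠ k)) := by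
      simp [List.filter]
    have hlen : (t.filter (fun x => decide (x ≠ k))).length ≤ t.length := List.length_filter_le _ _
    have ihr := ih ((t.filter (fun x => decide (x ≠ k))).length)
      (by subst hn; simpa using Nat.lt_succ_of_le hlen) (t.filter (fun x => decide (x ≠ k))) rfl
    rw [hrest, ihr]
    have hcnt : ((k :: t).length : Int) - ((t.filter (fun x => decide (x ≠ k))).length : Int)
        = ((k :: t).count k : Int) := by
      have h1 := List.length_eq_countP_add_countP (p := fun x => decide (x ≠ k)) (l := t)
      have h2 : t.countP (fun a => decide ¬((fun x => decide (x ≠ k)) a = true)) = t.count k := by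
        unfold List.count
        apply List.countP_congr
        intro a _
        by_cases hx : a = k <;> simp [hx]
      rw [h2] at h1
      have h3 : t.countP (fun x => decide (x ≠ k)) = (t.filter (fun x => decide (x ≠ k))).length :=
        List.countP_eq_length_filter (p := fun x => decide (x ≠ k)) (l := t)
      rw [h3] at h1
      simp only [List.count_cons, List.length_cons, beq_self_eq_true, if_pos]
      omega
    rw [hcnt]
    rw [PySem.Set.ofList_cons]
    simp only [List.map_cons, List.prod_cons]
    congr 1
    have hdis : (PySem.Set.ofList t).discard k
        = PySem.Set.ofList (t.filter (fun x => decide (x ≠ k))) := by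
      rw [ofList_filter]
      unfold PySem.Set.discard
      apply List.filter_congr
      intro a _
      simp [decide_not, Bool.beq_eq_decide_eq]
    rw [hdis]
    apply congrArg List.prod
    apply List.map_congr_left
    intro j hj
    have hjk : j ≠ k := by
      have := PySem.Set.nodup_ofList (xs := t.filter (fun x => decide (x ≠ k)))
      have hjmem := (PySem.Set.mem_ofList _ _).mp hj
      have := List.of_mem_filter hjmem
      simpa using this
    rw [count_filter_ne k j t hjk, List.count_cons_of_ne (Ne.symm hjk)]

-- ===== VERDICT (by name: the statement is the Claim_ definition above) =====
theorem solution_spec : Claim_equal_solution := by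
  intro clothes _
  unfold Spec_solution solution solution_alt
  rw [solution_fold_eq_counter, prodRest_eq]
  simp only [PySem.Dict.values, PySem.Dict.items_counter, List.map_map, foldl_mul_succ]
  simp only [one_mul]
  rfl
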